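-- pv_equiv track=rewrite | github.com/akriuchk/alto-analyser | src/reader.py | sub_list_with_padding
-- ===== SOURCE A (Python) =====
-- def sub_list_with_padding(line: list[str], word_idx: int, window: int, padding: str) -> list[str]:
--     result: list[str] = []
--
--     min_idx_before = word_idx - window
--     max_idx_after = word_idx + window
--
--     for i in range(min_idx_before, max_idx_after + 1):
--         if 0 <= i < len(line):
--             result.append(line[i])
--         else:
--             result.append(padding)
--
--     return result
-- ===== SOURCE B (Python) =====
-- def sub_list_with_padding(line: list[str], word_idx: int, window: int, padding: str) -> list[str]:
--     lo = word_idx - window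
--     hi = word_idx + window
--     total = hi - lo + 1
--     if total <= 0:
--         return []
--     core = line[max(0, lo):max(0, hi + 1)]
--     left = min(max(0, -lo), total)
--     right = total - left - len(core)
--     return [padding] * left + core + [padding] * right
-- ===== Notes on version B (the rewrite author's own statement) =====
-- stated objective: simpler
-- what changed: Replaces A's per-index loop with a bounds check at every index by one list slice for the in-range middle plus arithmetically computed left/right pad counts.
import Mathlib
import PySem

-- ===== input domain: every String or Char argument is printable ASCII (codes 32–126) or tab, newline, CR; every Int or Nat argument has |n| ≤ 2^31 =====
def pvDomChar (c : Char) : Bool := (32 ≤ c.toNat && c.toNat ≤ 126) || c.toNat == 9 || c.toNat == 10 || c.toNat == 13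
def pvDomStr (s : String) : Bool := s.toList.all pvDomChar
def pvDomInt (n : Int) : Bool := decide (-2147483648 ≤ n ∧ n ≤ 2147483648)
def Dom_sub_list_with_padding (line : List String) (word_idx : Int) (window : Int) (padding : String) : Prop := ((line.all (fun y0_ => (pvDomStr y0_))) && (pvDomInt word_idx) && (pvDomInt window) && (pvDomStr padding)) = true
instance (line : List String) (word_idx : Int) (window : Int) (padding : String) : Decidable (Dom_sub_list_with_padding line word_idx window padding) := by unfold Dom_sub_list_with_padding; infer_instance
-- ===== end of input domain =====

-- B replaces A's per-index bounds-checking loop by computed pad counts plus one slice (simpler decomposition; return value only).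

-- ===== PORT A =====
def sub_list_with_padding (line : List String) (word_idx : Int) (window : Int) (padding : String) : List String :=
  let min_idx_before := word_idx - window
  let max_idx_after := word_idx + window
  (PySem.List.pyRange min_idx_before (max_idx_after + 1) 1).foldl
    (fun result i =>
      if 0 ≤ i ∧ i < PySem.List.len line then
        result ++ [PySem.List.pyGetD line i padding]   -- guard makes the index in range; default never used
      else
        result ++ [padding]) []

-- ===== PORT B =====
def sub_list_with_padding_alt (line : List String) (word_idx : Int) (window : Int) (padding : String) : List String :=
  let lo := word_idx - window
  let hi := word_idx + window
  let total := hi - lo + 1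
  if total ≤ 0 then []
  else
    let core := PySem.List.slice line (some (max 0 lo)) (some (max 0 (hi + 1)))
    let left := min (max 0 (-lo)) total
    let right := total - left - (core.length : Int)
    List.replicate left.toNat padding ++ core ++ List.replicate right.toNat padding

-- ===== PRECONDITION & SPEC =====
def Spec_sub_list_with_padding (line : List String) (word_idx : Int) (window : Int) (padding : String) (out : List String) : Prop := out = sub_list_with_padding_alt line word_idx window padding
instance (line : List String) (word_idx : Int) (window : Int) (padding : String) (out : List String) : Decidable (Spec_sub_list_with_padding line word_idx window padding out) := by unfold Spec_sub_list_with_padding; infer_instance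

-- ===== CLAIM (what is proved, stated in full; the proofs are below) =====
def Claim_equal_sub_list_with_padding : Prop := ∀ (line : List String) (word_idx : Int) (window : Int) (padding : String), Dom_sub_list_with_padding line word_idx window padding → Spec_sub_list_with_padding line word_idx window padding (sub_list_with_padding line word_idx window padding)

-- ===== LEMMAS AND PROOFS =====

-- the loop body appends exactly one element per index
lemma pv_fold_body (xs : List String) (padding : String) :
    (fun (result : List String) (i : Int) =>
      if 0 ≤ i ∧ i < PySem.List.len xs then
        result ++ [PySem.List.pyGetD xs i padding]
      else
        result ++ [padding])
    = fun result i => result ++ [if 0 ≤ i ∧ i < (xs.length : Int) then PySem.List.pyGetD xs i padding else padding] := by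
  funext r i
  simp only [PySem.List.len_eq]
  split <;> rfl

-- core characterisation: the padded window over [lo, lo+n) is left pads ++ the in-range slice ++ right pads
lemma pv_window_eq (xs : List String) (padding : String) :
    ∀ (n : Nat) (lo : Int),
    (PySem.List.pyRange lo (lo + n) 1).map
      (fun i => if 0 ≤ i ∧ i < (xs.length : Int) then PySem.List.pyGetD xs i padding else padding)
    = List.replicate (min (-lo).toNat n) padding
      ++ PySem.List.slice xs (some (max 0 lo)) (some (max 0 (lo + n)))
      ++ List.replicate (n - min (-lo).toNat n
           - (PySem.List.slice xs (some (max 0 lo)) (some (max 0 (lo + n)))).length) padding := by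
  intro n
  induction n with
  | zero =>
    intro lo
    rw [PySem.List.pyRange_one_eq_nil (by omega)]
    rw [PySem.List.slice_toNat _ (by omega) (by omega)]
    simp
  | succ n ih =>
    intro lo
    rw [PySem.List.pyRange_one_cons (by omega : lo < lo + (n + 1 : Nat))]
    have hsh : lo + ((n + 1 : Nat) : Int) = (lo + 1) + (n : Nat) := by push_cast; ring
    rw [hsh, List.map_cons, ih (lo + 1)]
    by_cases h0 : lo < 0
    · -- head index is left padding
      have hhead : (if 0 ≤ lo ∧ lo < (xs.length : Int) then PySem.List.pyGetD xs lo padding else padding) = padding := by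
        rw [if_neg]; omega
      have hmaxa : max 0 lo = max 0 (lo + 1) := by omega
      have hl : min (-lo).toNat (n + 1) = min (-(lo + 1)).toNat n + 1 := by omega
      rw [hhead, hmaxa, hl, List.replicate_succ]
      have hr : n + 1 - (min (-(lo + 1)).toNat n + 1)
            - (PySem.List.slice xs (some (max 0 (lo + 1))) (some (max 0 (lo + 1 + (n : Nat))))).length
          = n - min (-(lo + 1)).toNat n
            - (PySem.List.slice xs (some (max 0 (lo + 1))) (some (max 0 (lo + 1 + (n : Nat))))).length := by
        omega
      rw [hr]
      simp
    · by_cases h1 : lo < (xs.length : Int)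
      · -- head index is the next core element
        have hlt : lo.toNat < xs.length := by omega
        have hhead : (if 0 ≤ lo ∧ lo < (xs.length : Int) then PySem.List.pyGetD xs lo padding else padding)
            = xs[lo.toNat] := by
          rw [if_pos ⟨by omega, h1⟩, PySem.List.pyGetD_eq_getElem _ _ (by omega) h1]
        have hS : PySem.List.slice xs (some (max 0 lo)) (some (max 0 (lo + 1 + (n : Nat))))
            = xs[lo.toNat]
              :: PySem.List.slice xs (some (max 0 (lo + 1))) (some (max 0 (lo + 1 + (n : Nat)))) := by
          rw [PySem.List.slice_toNat _ (by omega) (by omega),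
              PySem.List.slice_toNat _ (by omega) (by omega)]
          have hb : (max 0 (lo + 1 + (n : Nat))).toNat - (max 0 lo).toNat = n + 1 := by omega
          have hb' : (max 0 (lo + 1 + (n : Nat))).toNat - (max 0 (lo + 1)).toNat = n := by omega
          have ha : (max 0 lo).toNat = lo.toNat := by omega
          have ha' : (max 0 (lo + 1)).toNat = lo.toNat + 1 := by omega
          rw [hb, hb', ha, ha', List.drop_eq_getElem_cons hlt, List.take_succ_cons]
        have hl : min (-lo).toNat (n + 1) = 0 := by omega
        have hl' : min (-(lo + 1)).toNat n = 0 := by omega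
        rw [hhead, hS, hl, hl']
        have hr : n + 1 - 0 - (xs[lo.toNat]
              :: PySem.List.slice xs (some (max 0 (lo + 1))) (some (max 0 (lo + 1 + (n : Nat))))).length
            = n - 0 - (PySem.List.slice xs (some (max 0 (lo + 1))) (some (max 0 (lo + 1 + (n : Nat))))).length := by
          simp
        rw [hr]
        simp
      · -- head index is right padding; both slices are empty
        have hhead : (if 0 ≤ lo ∧ lo < (xs.length : Int) then PySem.List.pyGetD xs lo padding else padding) = padding := by
          rw [if_neg]; omega
        have hS : PySem.List.slice xs (some (max 0 lo)) (some (max 0 (lo + 1 + (n : Nat)))) = [] := by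
          rw [PySem.List.slice_toNat _ (by omega) (by omega)]
          rw [List.drop_eq_nil_of_le (by omega)]
          simp
        have hS' : PySem.List.slice xs (some (max 0 (lo + 1))) (some (max 0 (lo + 1 + (n : Nat)))) = [] := by
          rw [PySem.List.slice_toNat _ (by omega) (by omega)]
          rw [List.drop_eq_nil_of_le (by omega)]
          simp
        have hl : min (-lo).toNat (n + 1) = 0 := by omega
        have hl' : min (-(lo + 1)).toNat n = 0 := by omega
        rw [hhead, hS, hS', hl, hl']
        simp [List.replicate_succ]

-- ===== VERDICT (by name: the statement is the Claim_ definition above) =====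
theorem sub_list_with_padding_spec : Claim_equal_sub_list_with_padding := by
  intro xs word_idx window padding _
  unfold Spec_sub_list_with_padding sub_list_with_padding sub_list_with_padding_alt
  simp only []
  rw [pv_fold_body, PySem.List.foldl_append_singleton_eq_map, List.nil_append]
  set lo := word_idx - window with hlo
  set hi := word_idx + window with hhi
  by_cases htot : hi - lo + 1 ≤ 0
  · rw [PySem.List.pyRange_one_eq_nil (by omega), if_pos htot]
    simp
  · rw [if_neg htot]
    have hn : hi + 1 = lo + ((hi - lo + 1).toNat : Nat) := by omega
    rw [hn, pv_window_eq xs padding (hi - lo + 1).toNat lo]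
    have hup : lo + (((hi - lo + 1).toNat : Nat) : Int) = hi + 1 := by omega
    rw [hup]
    set core := PySem.List.slice xs (some (max 0 lo)) (some (max 0 (hi + 1))) with hcore
    have hL : (min (max 0 (-lo)) (hi - lo + 1)).toNat = min (-lo).toNat (hi - lo + 1).toNat := by omega
    have hR : (hi - lo + 1 - min (max 0 (-lo)) (hi - lo + 1) - (core.length : Int)).toNat
        = (hi - lo + 1).toNat - min (-lo).toNat (hi - lo + 1).toNat - core.length := by omega
    rw [hL, hR]
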